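-- pv_equiv track=rewrite | github.com/k-sriram/advent-of-code | 2024/day21.py | revers_dir
-- ===== SOURCE A (Python) =====
-- def revers_dir(code: str) -> str:
--     x, y = 2, 0
--     buttons = {(0, 1): "<", (1, 0): "^", (1, 1): "v", (2, 0): "A", (2, 1): ">"}
--     out = ""
--     for c in code:
--         if c == ">":
--             x += 1
--         elif c == "<":
--             x -= 1
--         elif c == "^":
--             y -= 1
--         elif c == "v":
--             y += 1
--         elif c == "A":
--             out += buttons[(x, y)]
--     return out
-- ===== SOURCE B (Python) =====
-- BUTTONS = {(0, 1): "<", (1, 0): "^", (1, 1): "v", (2, 0): "A", (2, 1): ">"}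
--
--
-- def revers_dir(code: str) -> str:
--     # Stateless: at each 'A' the arm position is a closed form of the prefix's
--     # character counts, so recompute it by counting instead of stepping a state
--     # machine: x = 2 + #'>' - #'<', y = #'v' - #'^' over code[: i + 1].
--     out = []
--     for i in range(len(code)):
--         if code[i] == "A":
--             prefix = code[: i + 1]
--             x = 2 + prefix.count(">") - prefix.count("<")
--             y = prefix.count("v") - prefix.count("^")
--             out.append(BUTTONS[(x, y)])
--     return "".join(out)
-- ===== Notes on version B (the rewrite author's own statement) =====
-- stated objective: alternative
-- what changed: Replaces A's incremental state machine (per-character if/elif position updates) by a stateless closed form: for each 'A' at index i the position is recomputed directly from prefix character counts (x = 2 + count('>') - count('<'), y = count('v') - count('^') over code[:i+1]), so no running position is maintained at all.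
import Mathlib
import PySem

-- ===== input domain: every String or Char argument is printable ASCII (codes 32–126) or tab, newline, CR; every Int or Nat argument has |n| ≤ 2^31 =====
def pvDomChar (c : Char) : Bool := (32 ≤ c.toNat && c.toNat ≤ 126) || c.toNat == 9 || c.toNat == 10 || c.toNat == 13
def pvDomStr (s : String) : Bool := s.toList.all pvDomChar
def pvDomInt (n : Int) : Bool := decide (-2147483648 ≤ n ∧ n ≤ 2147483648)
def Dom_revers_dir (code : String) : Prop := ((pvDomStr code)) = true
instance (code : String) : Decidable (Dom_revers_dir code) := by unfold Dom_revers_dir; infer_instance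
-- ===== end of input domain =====

-- B drops A's running state machine: at each 'A' it recomputes the position as a
-- closed form of the prefix's character counts; same results, different decomposition.

-- ===== PORT A =====
def pvButtons : PySem.Dict (Int × Int) String :=
  PySem.Dict.ofList
    [(((0:Int), (1:Int)), "<"), (((1:Int), (0:Int)), "^"), (((1:Int), (1:Int)), "v"),
     (((2:Int), (0:Int)), "A"), (((2:Int), (1:Int)), ">")]

-- the loop body of A; the 'A' branch's buttons[(x, y)] raises KeyError when (x, y) is not a key,
-- and Pre_revers_dir excludes exactly those inputs, so getD's default is never reached inside Pre_.
def pvAStep (st : Int × Int × String) (c : Char) : Int × Int × String :=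
  if c = '>' then (st.1 + 1, st.2.1, st.2.2)
  else if c = '<' then (st.1 - 1, st.2.1, st.2.2)
  else if c = '^' then (st.1, st.2.1 - 1, st.2.2)
  else if c = 'v' then (st.1, st.2.1 + 1, st.2.2)
  else if c = 'A' then (st.1, st.2.1, st.2.2 ++ PySem.Dict.getD pvButtons (st.1, st.2.1) "")
  else st

def revers_dir (code : String) : String :=
  (code.toList.foldl pvAStep ((2 : Int), (0 : Int), "")).2.2

-- ===== PORT B =====
-- for i in range(len(code)): if code[i] == 'A': look up the closed-form position of
-- the prefix code[:i+1] (BUTTONS lookup raises outside Pre_, as in Source B)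
def revers_dir_alt (code : String) : String :=
  String.join ((List.range code.toList.length).filterMap (fun i =>
    if code.toList.getD i ' ' = 'A' then
      some (PySem.Dict.getD pvButtons
        (2 + ((code.toList.take (i + 1)).count '>' : Int)
           - ((code.toList.take (i + 1)).count '<' : Int),
         ((code.toList.take (i + 1)).count 'v' : Int)
           - ((code.toList.take (i + 1)).count '^' : Int)) "")
    else none))

-- ===== PRECONDITION & SPEC =====
-- Pre_ excludes exactly the inputs on which A raises KeyError: some 'A' is reached while the
-- running position (a prefix-count expression) is not one of the five keypad keys.
def Pre_revers_dir (code : String) : Prop :=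
  ∀ i ∈ List.range code.toList.length, code.toList.getD i ' ' = 'A' →
    ((2 : Int) + ((code.toList.take (i + 1)).count '>' : Int)
        - ((code.toList.take (i + 1)).count '<' : Int),
     (((code.toList.take (i + 1)).count 'v' : Int)
        - ((code.toList.take (i + 1)).count '^' : Int)))
      ∈ [((0 : Int), (1 : Int)), (1, 0), (1, 1), (2, 0), (2, 1)]
instance (code : String) : Decidable (Pre_revers_dir code) := by unfold Pre_revers_dir; infer_instance
def pvWitness_revers_dir : String := "v<<A>>^A"

def Spec_revers_dir (code : String) (out : String) : Prop := out = revers_dir_alt code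
instance (code : String) (out : String) : Decidable (Spec_revers_dir code out) := by unfold Spec_revers_dir; infer_instance

-- ===== CLAIM (what is proved, stated in full; the proofs are below) =====
def Claim_equal_revers_dir : Prop := ∀ (code : String), Dom_revers_dir code → Pre_revers_dir code → Spec_revers_dir code (revers_dir code)

-- ===== LEMMAS AND PROOFS =====

-- the value A's loop gathers from a start position, written recursively
def pvGather : List Char → Int → Int → String
  | [], _, _ => ""
  | c :: cs, x, y =>
    if c = '>' then pvGather cs (x + 1) y
    else if c = '<' then pvGather cs (x - 1) y
    else if c = '^' then pvGather cs x (y - 1)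
    else if c = 'v' then pvGather cs x (y + 1)
    else if c = 'A' then PySem.Dict.getD pvButtons (x, y) "" ++ pvGather cs x y
    else pvGather cs x y

-- B's selection list, generalized over the start position
def pvSel (cs : List Char) (x y : Int) : List String :=
  (List.range cs.length).filterMap (fun i =>
    if cs.getD i ' ' = 'A' then
      some (PySem.Dict.getD pvButtons
        (x + ((cs.take (i + 1)).count '>' : Int) - ((cs.take (i + 1)).count '<' : Int),
         y + ((cs.take (i + 1)).count 'v' : Int) - ((cs.take (i + 1)).count '^' : Int)) "")
    else none)

theorem pv_join_acc (l : List String) (a : String) :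
    l.foldl (· ++ ·) a = a ++ l.foldl (· ++ ·) "" := by
  induction l generalizing a with
  | nil => simp
  | cons s l ih => simp [List.foldl, ih (a ++ s), ih s, String.append_assoc]

theorem pv_join_cons (s : String) (l : List String) :
    String.join (s :: l) = s ++ String.join l := by
  simp [String.join, List.foldl]
  exact pv_join_acc l s

theorem pvA_loop (cs : List Char) (x y : Int) (out : String) :
    (cs.foldl pvAStep (x, y, out)).2.2 = out ++ pvGather cs x y := by
  induction cs generalizing x y out with
  | nil => simp [pvGather]
  | cons c cs ih =>
    rw [List.foldl_cons]
    by_cases h1 : c = '>'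
    · subst h1
      rw [show pvAStep (x, y, out) '>' = (x + 1, y, out) from by simp [pvAStep], ih]
      simp [pvGather]
    · by_cases h2 : c = '<'
      · subst h2
        rw [show pvAStep (x, y, out) '<' = (x - 1, y, out) from by simp [pvAStep], ih]
        simp [pvGather]
      · by_cases h3 : c = '^'
        · subst h3
          rw [show pvAStep (x, y, out) '^' = (x, y - 1, out) from by simp [pvAStep], ih]
          simp [pvGather]
        · by_cases h4 : c = 'v'
          · subst h4
            rw [show pvAStep (x, y, out) 'v' = (x, y + 1, out) from by simp [pvAStep], ih]
            simp [pvGather]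
          · by_cases h5 : c = 'A'
            · subst h5
              rw [show pvAStep (x, y, out) 'A'
                    = (x, y, out ++ PySem.Dict.getD pvButtons (x, y) "") from by simp [pvAStep], ih]
              simp [pvGather, String.append_assoc]
            · rw [show pvAStep (x, y, out) c = (x, y, out) from by
                    simp [pvAStep, h1, h2, h3, h4, h5], ih]
              simp [pvGather, h1, h2, h3, h4, h5]

-- peel one character off B's selection: the head index contributes the head character's
-- count, and the tail indices see the tail list with the start position advanced by c
theorem pvSel_cons (c : Char) (cs : List Char) (x y : Int) :
    pvSel (c :: cs) x y =
      (if c = 'A' then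
        [PySem.Dict.getD pvButtons
          (x + (if c = '>' then 1 else 0) - (if c = '<' then 1 else 0),
           y + (if c = 'v' then 1 else 0) - (if c = '^' then 1 else 0)) ""]
       else [])
      ++ pvSel cs
          (x + (if c = '>' then 1 else 0) - (if c = '<' then 1 else 0))
          (y + (if c = 'v' then 1 else 0) - (if c = '^' then 1 else 0)) := by
  unfold pvSel
  rw [List.length_cons, List.range_succ_eq_map, List.filterMap_cons, List.filterMap_map]
  have htail : List.filterMap
      ((fun i => if (c :: cs).getD i ' ' = 'A' then
          some (PySem.Dict.getD pvButtons
            (x + ((((c :: cs)).take (i + 1)).count '>' : Int)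
               - ((((c :: cs)).take (i + 1)).count '<' : Int),
             y + ((((c :: cs)).take (i + 1)).count 'v' : Int)
               - ((((c :: cs)).take (i + 1)).count '^' : Int)) "")
        else none) ∘ Nat.succ) (List.range cs.length)
      = List.filterMap (fun i => if cs.getD i ' ' = 'A' then
          some (PySem.Dict.getD pvButtons
            ((x + (if c = '>' then 1 else 0) - (if c = '<' then 1 else 0))
               + ((cs.take (i + 1)).count '>' : Int) - ((cs.take (i + 1)).count '<' : Int),
             (y + (if c = 'v' then 1 else 0) - (if c = '^' then 1 else 0))
               + ((cs.take (i + 1)).count 'v' : Int) - ((cs.take (i + 1)).count '^' : Int)) "")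
        else none) (List.range cs.length) := by
    apply List.filterMap_congr
    intro i _
    simp only [Function.comp, List.getD_cons_succ, List.take_succ_cons, List.count_cons,
      beq_iff_eq]
    by_cases hA : cs.getD i ' ' = 'A'
    · rw [if_pos hA, if_pos hA]
      have e1 : x + (((cs.take (i + 1)).count '>' + if c = '>' then 1 else 0 : Nat) : Int)
            - (((cs.take (i + 1)).count '<' + if c = '<' then 1 else 0 : Nat) : Int)
          = (x + (if c = '>' then 1 else 0) - (if c = '<' then 1 else 0))
              + ((cs.take (i + 1)).count '>' : Int) - ((cs.take (i + 1)).count '<' : Int) := by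
        split_ifs <;> push_cast <;> ring
      have e2 : y + (((cs.take (i + 1)).count 'v' + if c = 'v' then 1 else 0 : Nat) : Int)
            - (((cs.take (i + 1)).count '^' + if c = '^' then 1 else 0 : Nat) : Int)
          = (y + (if c = 'v' then 1 else 0) - (if c = '^' then 1 else 0))
              + ((cs.take (i + 1)).count 'v' : Int) - ((cs.take (i + 1)).count '^' : Int) := by
        split_ifs <;> push_cast <;> ring
      rw [e1, e2]
    · rw [if_neg hA, if_neg hA]
  rw [htail]
  by_cases hA : c = 'A'
  · subst hA
    rw [if_pos rfl]
    simp only [List.getD_cons_zero, List.take_succ_cons, List.take_zero,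
      List.count_cons, List.count_nil, List.singleton_append]
    congr 3
  · rw [if_neg hA]
    simp only [List.getD_cons_zero, if_neg hA, List.nil_append]

theorem pvSel_eq_gather (cs : List Char) (x y : Int) :
    String.join (pvSel cs x y) = pvGather cs x y := by
  induction cs generalizing x y with
  | nil => simp [pvSel, pvGather, String.join]
  | cons c cs ih =>
    rw [pvSel_cons]
    by_cases h1 : c = '>'
    · subst h1; simp [pvGather, ih]
    · by_cases h2 : c = '<'
      · subst h2; simp [pvGather, ih]
      · by_cases h3 : c = '^'
        · subst h3; simp [pvGather, ih]
        · by_cases h4 : c = 'v'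
          · subst h4; simp [pvGather, ih]
          · by_cases h5 : c = 'A'
            · subst h5
              rw [if_pos rfl]
              simp only [h1, h2, h3, h4, List.singleton_append, pv_join_cons, ih]
              simp [pvGather, h1, h2, h3, h4]
            · simp [pvGather, h1, h2, h3, h4, h5, ih]

theorem pvAlt_eq_sel (code : String) :
    revers_dir_alt code = String.join (pvSel code.toList 2 0) := by
  unfold revers_dir_alt pvSel
  congr 1
  apply List.filterMap_congr
  intro i _
  simp

-- ===== VERDICT (by name: the statement is the Claim_ definition above) =====
theorem revers_dir_spec : Claim_equal_revers_dir := by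
  intro code _ _
  unfold Spec_revers_dir revers_dir
  rw [pvAlt_eq_sel, pvSel_eq_gather, pvA_loop]
  simp
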